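-- pv_equiv track=rewrite | github.com/pypi-data/pypi-mirror-97 | packages/daves-dev-tools/daves-dev-tools-0.3.3.tar.gz/daves-dev-tools-0.3.3/daves_dev_tools/distribute.py | _argv_positional_last_index
-- ===== SOURCE A (Python) =====
-- from typing import (
--     Any,
--     Callable,
--     Dict,
--     FrozenSet,
--     Iterable,
--     List,
--     Optional,
--     Tuple,
--     Union,
-- )
--
-- def _argv_positional_last_index(argv: List[str]) -> Optional[int]:
--     index: int
--     for index in range(len(argv) - 1, 0, -1):
--         if not (
--             argv[index].startswith("-") or argv[index - 1].startswith("-")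
--         ):
--             return index
--     return None
-- ===== SOURCE B (Python) =====
-- from typing import List, Optional
--
-- def _argv_positional_last_index(argv: List[str]) -> Optional[int]:
--     last: Optional[int] = None
--     for index in range(1, len(argv)):
--         if not (
--             argv[index].startswith("-") or argv[index - 1].startswith("-")
--         ):
--             last = index
--     return last
-- ===== Notes on version B (the rewrite author's own statement) =====
-- stated objective: alternative
-- what changed: Replaces the backward scan with an early return by a full forward single pass that keeps the last qualifying index in an accumulator and returns it after the loop.
import Mathlib
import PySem

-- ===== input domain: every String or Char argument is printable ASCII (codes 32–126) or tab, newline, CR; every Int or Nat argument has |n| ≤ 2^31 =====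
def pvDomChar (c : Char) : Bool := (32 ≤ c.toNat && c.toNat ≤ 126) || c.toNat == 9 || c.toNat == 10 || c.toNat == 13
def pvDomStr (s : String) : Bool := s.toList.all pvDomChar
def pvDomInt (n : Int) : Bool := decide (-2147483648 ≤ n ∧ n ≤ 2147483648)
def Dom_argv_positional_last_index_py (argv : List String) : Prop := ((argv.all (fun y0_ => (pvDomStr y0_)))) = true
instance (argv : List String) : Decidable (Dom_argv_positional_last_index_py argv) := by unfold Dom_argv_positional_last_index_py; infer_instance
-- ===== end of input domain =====

-- B replaces A's backward scan with early return by a full forward pass keeping the last qualifying index (alternative decomposition, same cost).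

-- ===== PORT A =====
-- A's `for index in range(len(argv)-1, 0, -1): if …: return index` — early return = first match of the countdown list.
def pvALoop (argv : List String) : List Int → Option Int
  | [] => none
  | index :: rest =>
      if ¬ (PySem.Str.startswith (PySem.List.pyGetD argv index "") "-"
            ∨ PySem.Str.startswith (PySem.List.pyGetD argv (index - 1) "") "-") then
        some index
      else
        pvALoop argv rest

def argv_positional_last_index_py (argv : List String) : Option Int :=
  pvALoop argv (PySem.List.pyRange (PySem.List.len argv - 1) 0 (-1))

-- ===== PORT B =====
-- B's forward loop: `last = None; for index in range(1, len(argv)): if …: last = index`.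
def argv_positional_last_index_py_alt (argv : List String) : Option Int :=
  (PySem.List.pyRange 1 (PySem.List.len argv) 1).foldl
    (fun last index =>
      if ¬ (PySem.Str.startswith (PySem.List.pyGetD argv index "") "-"
            ∨ PySem.Str.startswith (PySem.List.pyGetD argv (index - 1) "") "-") then
        some index
      else
        last)
    none

-- ===== PRECONDITION & SPEC =====
def Spec_argv_positional_last_index_py (argv : List String) (out : Option Int) : Prop := out = argv_positional_last_index_py_alt argv
instance (argv : List String) (out : Option Int) : Decidable (Spec_argv_positional_last_index_py argv out) := by unfold Spec_argv_positional_last_index_py; infer_instance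

-- ===== CLAIM (what is proved, stated in full; the proofs are below) =====
def Claim_equal_argv_positional_last_index_py : Prop := ∀ (argv : List String), Dom_argv_positional_last_index_py argv → Spec_argv_positional_last_index_py argv (argv_positional_last_index_py argv)

-- ===== LEMMAS AND PROOFS =====

-- first match distributes over append
theorem pvALoop_append (argv : List String) (u v : List Int) :
    pvALoop argv (u ++ v) = (pvALoop argv u).or (pvALoop argv v) := by
  induction u with
  | nil => simp [pvALoop]
  | cons x t ih =>
      simp only [List.cons_append, pvALoop]
      split_ifs with h <;> simp [ih, Option.or]

-- a last-match foldl over l equals the first match of l.reverse, with the accumulator as fallback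
theorem pvFold_eq_aloop_reverse (argv : List String) (l : List Int) (acc : Option Int) :
    l.foldl
      (fun last index =>
        if ¬ (PySem.Str.startswith (PySem.List.pyGetD argv index "") "-"
              ∨ PySem.Str.startswith (PySem.List.pyGetD argv (index - 1) "") "-") then
          some index
        else
          last)
      acc = (pvALoop argv l.reverse).or acc := by
  induction l generalizing acc with
  | nil => simp [pvALoop]
  | cons x t ih =>
      simp only [List.foldl_cons, List.reverse_cons, pvALoop_append, ih]
      cases h : pvALoop argv t.reverse with
      | some v => simp [Option.or]
      | none =>
          simp only [Option.or, pvALoop]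
          split_ifs with hx <;> simp

-- ===== VERDICT (by name: the statement is the Claim_ definition above) =====
theorem argv_positional_last_index_py_spec : Claim_equal_argv_positional_last_index_py := by
  intro argv _
  show argv_positional_last_index_py argv = argv_positional_last_index_py_alt argv
  unfold argv_positional_last_index_py argv_positional_last_index_py_alt
  rw [pvFold_eq_aloop_reverse]
  rw [show PySem.List.pyRange (PySem.List.len argv - 1) 0 (-1)
        = (PySem.List.pyRange 1 (PySem.List.len argv) 1).reverse from by
        rw [PySem.List.pyRange_neg_one_eq_reverse]; norm_num]
  simp
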